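-- pv_equiv track=rewrite | github.com/emsrc/daeso-dutch | lib/daeso_nl/cornetto/cornet.py | _least_common_subsumers_hyp
-- ===== SOURCE A (Python) =====
-- def _least_common_subsumers_hyp(from_hyp, to_hyp):
--     # calculate lcs from two sets of hyperonyms
--     acs = dict()
--
--     for lu, dist in from_hyp.items():
--         try:
--             sum_of_dist = dist + to_hyp[lu]
--         except KeyError:
--             continue
--
--         acs.setdefault(sum_of_dist, []).append(lu)
--
--     if acs:
--         minimum = min(acs.keys())
--         return acs[minimum]
--     else:
--         return []
-- ===== SOURCE B (Python) =====
-- def _least_common_subsumers_hyp(from_hyp, to_hyp):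
--     # single pass: track the best (minimal) combined distance and its lu's directly
--     best_sum = None
--     best = []
--     for lu, dist in from_hyp.items():
--         if lu not in to_hyp:
--             continue
--         s = dist + to_hyp[lu]
--         if best_sum is None or s < best_sum:
--             best_sum = s
--             best = [lu]
--         elif s == best_sum:
--             best.append(lu)
--     return best
-- ===== Notes on version B (the rewrite author's own statement) =====
-- stated objective: simpler
-- what changed: Replaces the intermediate dict grouping lu's by combined distance plus a separate min-over-keys pass with a single running-minimum pass that tracks the best combined distance and its lu list directly.
import Mathlib
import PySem

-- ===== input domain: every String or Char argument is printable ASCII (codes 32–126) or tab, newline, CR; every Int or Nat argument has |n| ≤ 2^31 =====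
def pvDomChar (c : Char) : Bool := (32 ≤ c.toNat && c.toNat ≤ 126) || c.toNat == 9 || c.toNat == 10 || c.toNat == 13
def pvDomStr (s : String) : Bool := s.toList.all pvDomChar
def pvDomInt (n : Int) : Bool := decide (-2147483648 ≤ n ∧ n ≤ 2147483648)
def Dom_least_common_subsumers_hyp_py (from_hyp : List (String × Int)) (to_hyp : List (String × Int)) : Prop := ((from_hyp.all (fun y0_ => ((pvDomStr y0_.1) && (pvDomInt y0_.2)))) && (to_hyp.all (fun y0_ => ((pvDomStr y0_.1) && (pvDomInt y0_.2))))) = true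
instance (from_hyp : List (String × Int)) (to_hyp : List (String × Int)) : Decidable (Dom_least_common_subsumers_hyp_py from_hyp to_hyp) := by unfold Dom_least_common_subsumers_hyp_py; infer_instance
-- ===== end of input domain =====

-- B replaces A's distance-keyed grouping dict plus separate min pass by a single running-minimum
-- pass (best combined distance so far and its lu's); same return value.

-- ===== PORT A =====
-- acs.setdefault(s, []).append(lu)  is  acs.modify s [] (· ++ [lu]);  to_hyp[lu] with
-- 'except KeyError: continue' is a match on the first-match lookup List.lookup.
def least_common_subsumers_hyp_py (from_hyp : List (String × Int)) (to_hyp : List (String × Int)) : List String :=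
  let acs : PySem.Dict Int (List String) :=
    from_hyp.foldl (fun acs p =>
      match List.lookup p.1 to_hyp with
      | none => acs
      | some d2 => acs.modify (p.2 + d2) [] (fun v => v ++ [p.1])) PySem.Dict.empty
  if acs.size ≠ 0 then
    match PySem.List.min? acs.keys id with
    | none => []
    | some m => acs.getD m []
  else []

-- ===== PORT B =====
def least_common_subsumers_hyp_py_alt (from_hyp : List (String × Int)) (to_hyp : List (String × Int)) : List String :=
  (from_hyp.foldl (fun (st : Option Int × List String) p =>
      match List.lookup p.1 to_hyp with
      | none => st
      | some d2 =>
        let s := p.2 + d2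
        match st.1 with
        | none => (some s, [p.1])
        | some b =>
          if s < b then (some s, [p.1])
          else if s = b then (some b, st.2 ++ [p.1])
          else st)
    (none, [])).2

-- ===== PRECONDITION & SPEC =====
def Spec_least_common_subsumers_hyp_py (from_hyp : List (String × Int)) (to_hyp : List (String × Int)) (out : List String) : Prop := out = least_common_subsumers_hyp_py_alt from_hyp to_hyp
instance (from_hyp : List (String × Int)) (to_hyp : List (String × Int)) (out : List String) : Decidable (Spec_least_common_subsumers_hyp_py from_hyp to_hyp out) := by unfold Spec_least_common_subsumers_hyp_py; infer_instance

-- ===== CLAIM (what is proved, stated in full; the proofs are below) =====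
def Claim_equal_least_common_subsumers_hyp_py : Prop := ∀ (from_hyp : List (String × Int)) (to_hyp : List (String × Int)), Dom_least_common_subsumers_hyp_py from_hyp to_hyp → Spec_least_common_subsumers_hyp_py from_hyp to_hyp (least_common_subsumers_hyp_py from_hyp to_hyp)

-- ===== LEMMAS AND PROOFS =====

-- The matched entries: (combined distance, lu) for each lu of from_hyp that also occurs in to_hyp.
def pvMatched (from_hyp : List (String × Int)) (to_hyp : List (String × Int)) : List (Int × String) :=
  from_hyp.filterMap (fun p => (List.lookup p.1 to_hyp).map (fun d2 => (p.2 + d2, p.1)))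

-- B's loop body, as a function of a matched entry.
def pvStepB (st : Option Int × List String) (q : Int × String) : Option Int × List String :=
  match st.1 with
  | none => (some q.1, [q.2])
  | some b =>
    if q.1 < b then (some q.1, [q.2])
    else if q.1 = b then (some b, st.2 ++ [q.2])
    else st

-- A's loop is the grouping loop over the matched entries.
theorem lcsA_fold (from_hyp : List (String × Int)) (to_hyp : List (String × Int))
    (d : PySem.Dict Int (List String)) :
    from_hyp.foldl (fun acs p =>
      match List.lookup p.1 to_hyp with
      | none => acs
      | some d2 => acs.modify (p.2 + d2) [] (fun v => v ++ [p.1])) d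
    = (pvMatched from_hyp to_hyp).foldl (fun d q => d.modify q.1 [] (fun v => v ++ [q.2])) d := by
  induction from_hyp generalizing d with
  | nil => rfl
  | cons p t ih =>
    simp only [List.foldl_cons, pvMatched, List.filterMap_cons]
    cases h : List.lookup p.1 to_hyp with
    | none => simpa [pvMatched] using ih d
    | some d2 => simpa [pvMatched] using ih _

-- B's loop is the running-minimum loop over the matched entries.
theorem lcsB_fold (from_hyp : List (String × Int)) (to_hyp : List (String × Int))
    (st : Option Int × List String) :
    from_hyp.foldl (fun (st : Option Int × List String) p =>
      match List.lookup p.1 to_hyp with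
      | none => st
      | some d2 =>
        let s := p.2 + d2
        match st.1 with
        | none => (some s, [p.1])
        | some b =>
          if s < b then (some s, [p.1])
          else if s = b then (some b, st.2 ++ [p.1])
          else st) st
    = (pvMatched from_hyp to_hyp).foldl pvStepB st := by
  induction from_hyp generalizing st with
  | nil => rfl
  | cons p t ih =>
    simp only [List.foldl_cons, pvMatched, List.filterMap_cons]
    cases h : List.lookup p.1 to_hyp with
    | none => simpa [pvMatched] using ih st
    | some d2 => simpa [pvMatched, pvStepB] using ih _

theorem foldl_min_le_init (xs : List Int) (a : Int) : xs.foldl min a ≤ a := by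
  induction xs generalizing a with
  | nil => simp
  | cons x t ih => simpa using le_trans (ih (min a x)) (by omega)

-- Invariant of B's running-minimum loop, for an arbitrary already-seen state.
theorem pvStepB_G (l : List (Int × String)) (b : Int) (w : List String) :
    l.foldl pvStepB (some b, w)
    = (some ((l.map Prod.fst).foldl min b),
       (if (l.map Prod.fst).foldl min b = b then w else [])
         ++ (l.filter (fun q => q.1 == ((l.map Prod.fst).foldl min b))).map Prod.snd) := by
  induction l generalizing b w with
  | nil => simp
  | cons q t ih =>
    simp only [List.foldl_cons, List.map_cons, List.filter_cons]
    have hle : (t.map Prod.fst).foldl min (min b q.1) ≤ min b q.1 := foldl_min_le_init _ _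
    by_cases h1 : q.1 < b
    · have hb : min b q.1 = q.1 := by omega
      rw [show pvStepB (some b, w) q = (some q.1, [q.2]) by simp [pvStepB, h1], ih]
      simp only [hb] at hle ⊢
      have hne : (t.map Prod.fst).foldl min q.1 ≠ b := by omega
      by_cases h2 : q.1 = (t.map Prod.fst).foldl min q.1
      · simp [← h2, show ¬q.1 = b by omega]
      · simp [hne, h2, show ¬(t.map Prod.fst).foldl min q.1 = q.1 from fun h => h2 h.symm]
    · by_cases h2 : q.1 = b
      · subst h2
        rw [show pvStepB (some q.1, w) q = (some q.1, w ++ [q.2]) by simp [pvStepB], ih]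
        simp only [min_self] at hle ⊢
        by_cases h3 : (t.map Prod.fst).foldl min q.1 = q.1
        · simp [h3]
        · simp [h3, show ¬q.1 = (t.map Prod.fst).foldl min q.1 from fun h => h3 h.symm]
      · have hb : min b q.1 = b := by omega
        rw [show pvStepB (some b, w) q = (some b, w) by simp [pvStepB, h1, h2], ih]
        simp only [hb] at hle ⊢
        have hne : q.1 ≠ (t.map Prod.fst).foldl min b := by omega
        simp [hne]

-- Python's min on a nonempty list of ints is the min-fold.
theorem pymin_cons (t : List Int) (a : Int) :
    PySem.List.min? (a :: t) id = some (t.foldl min a) := by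
  induction t generalizing a with
  | nil => rfl
  | cons x t ih =>
    have h1 : PySem.List.min? (a :: x :: t) id = PySem.List.min? (min a x :: t) id := by
      simp only [PySem.List.min?, List.foldl_cons]
      congr 1
      by_cases h : x < a
      · simp [min_def, h]
      · simp [min_def, h]
    rw [h1, ih]
    simp

theorem pymin_eq (xs : List Int) : PySem.List.min? xs id = xs.min? := by
  cases xs with
  | nil => rfl
  | cons a t => rw [pymin_cons]; rfl

-- min over the key SET equals min over the key list (same elements).
theorem min?_ofList (xs : List Int) : PySem.List.min? (PySem.Set.ofList xs) id = xs.min? := by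
  rw [pymin_eq]
  cases h : xs.min? with
  | none =>
    rw [List.min?_eq_none_iff] at h
    subst h; rfl
  | some m =>
    rw [List.min?_eq_some_iff] at h
    rw [List.min?_eq_some_iff]
    exact ⟨(PySem.Set.mem_ofList xs m).2 h.1, fun b hb => h.2 b ((PySem.Set.mem_ofList xs b).1 hb)⟩

-- Core: on the matched entries, A's group-then-min equals B's running minimum.
theorem lcs_main (l : List (Int × String)) :
    (if (l.foldl (fun d q => d.modify q.1 [] (fun v => v ++ [q.2])) (PySem.Dict.empty : PySem.Dict Int (List String))).size ≠ 0 then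
      match PySem.List.min? (l.foldl (fun d q => d.modify q.1 [] (fun v => v ++ [q.2])) (PySem.Dict.empty : PySem.Dict Int (List String))).keys id with
      | none => []
      | some m => (l.foldl (fun d q => d.modify q.1 [] (fun v => v ++ [q.2])) (PySem.Dict.empty : PySem.Dict Int (List String))).getD m []
     else [])
    = (l.foldl pvStepB ((none : Option Int), ([] : List String))).2 := by
  have hkeys : (l.foldl (fun d q => d.modify q.1 [] (fun v => v ++ [q.2])) (PySem.Dict.empty : PySem.Dict Int (List String))).keys
      = PySem.Set.ofList (l.map Prod.fst) := by
    have h := PySem.Dict.keys_foldl_modify_key l Prod.fst [] (fun _ q v => v ++ [q.2]) PySem.Dict.empty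
    simpa [PySem.Set.update_nil_left, PySem.Dict.keys_empty] using h
  cases l with
  | nil => simp [PySem.Dict.size_empty]
  | cons q t =>
    have hne : (( (q :: t).foldl (fun d q => d.modify q.1 [] (fun v => v ++ [q.2])) (PySem.Dict.empty : PySem.Dict Int (List String))).size ≠ 0) := by
      intro h0
      have hk0 : ((q :: t).foldl (fun d q => d.modify q.1 [] (fun v => v ++ [q.2])) (PySem.Dict.empty : PySem.Dict Int (List String))).keys = [] := by
        simpa [PySem.Dict.keys, PySem.Dict.size, List.length_eq_zero_iff] using
          (by simpa [PySem.Dict.size] using h0 : _)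
      have h2 : PySem.Set.ofList ((q :: t).map Prod.fst) = [] := hkeys ▸ hk0
      have h3 : q.1 ∈ PySem.Set.ofList ((q :: t).map Prod.fst) := (PySem.Set.mem_ofList _ _).2 (by simp)
      rw [h2] at h3; simp at h3
    rw [if_pos hne, hkeys, min?_ofList]
    have hmin : ((q :: t).map Prod.fst).min? = some ((t.map Prod.fst).foldl min q.1) := by
      simp [List.min?]
    simp only [hmin]
    rw [PySem.Dict.getD_foldl_modify_append]
    rw [show (q :: t).foldl pvStepB ((none : Option Int), ([] : List String))
        = t.foldl pvStepB (some q.1, [q.2]) from rfl]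
    rw [pvStepB_G]
    simp only [PySem.Dict.getD_empty, List.nil_append, List.filter_cons]
    by_cases h : q.1 = (t.map Prod.fst).foldl min q.1
    · simp [← h]
    · simp [h, show ¬(t.map Prod.fst).foldl min q.1 = q.1 from fun hh => h hh.symm]

theorem lcs_spec' (from_hyp : List (String × Int)) (to_hyp : List (String × Int)) :
    least_common_subsumers_hyp_py from_hyp to_hyp = least_common_subsumers_hyp_py_alt from_hyp to_hyp := by
  unfold least_common_subsumers_hyp_py least_common_subsumers_hyp_py_alt
  rw [lcsA_fold, lcsB_fold]
  exact lcs_main (pvMatched from_hyp to_hyp)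

-- ===== VERDICT (by name: the statement is the Claim_ definition above) =====
theorem least_common_subsumers_hyp_py_spec : Claim_equal_least_common_subsumers_hyp_py := by
  intro fh th _
  exact lcs_spec' fh th
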